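-- pv_equiv track=rewrite | github.com/abalas/daw2-python | Examenes/2ºExamePrimerTrimestre/CodificarPin.py | devuelveCodigo
-- ===== SOURCE A (Python) =====
-- def devuelveCodigo(n):
--     lista = list("XXXXXXXXXX")
--     lista_aux = (lista).copy()
--     numero = f"{n:04d}"
--     resultados= list()
--
--     for i in range (0,len(numero)):
--         cont = 0;
--         for j in range(0,int(numero[i])):
--             lista[len(lista)-int(numero[i])-cont]="O"
--             cont -= 1
--         resultados.append("".join(lista))
--         lista= lista_aux.copy()
--     return(tuple(resultados))
-- ===== SOURCE B (Python) =====
-- def devuelveCodigo(n):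
--     # Closed form per digit: int(c) keeps the ValueError on '-' for negative n, like the original.
--     return tuple("X" * (10 - int(c)) + "O" * int(c) for c in f"{n:04d}")
-- ===== Notes on version B (the rewrite author's own statement) =====
-- stated objective: simpler
-- what changed: Replaces the copied mutable marker list and the inner position-by-position mutation loop with its cont counter by a single comprehension that emits, per formatted digit, the closed-form string of X's followed by O's.
import Mathlib
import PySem

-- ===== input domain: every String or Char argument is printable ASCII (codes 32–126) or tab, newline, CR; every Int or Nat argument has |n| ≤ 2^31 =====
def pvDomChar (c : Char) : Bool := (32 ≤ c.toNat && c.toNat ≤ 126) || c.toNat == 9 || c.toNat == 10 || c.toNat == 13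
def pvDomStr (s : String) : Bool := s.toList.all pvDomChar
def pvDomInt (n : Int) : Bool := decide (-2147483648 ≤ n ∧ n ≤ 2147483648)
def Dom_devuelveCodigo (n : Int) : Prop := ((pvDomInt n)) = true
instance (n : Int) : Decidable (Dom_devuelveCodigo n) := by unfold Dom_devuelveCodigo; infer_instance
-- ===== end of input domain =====

-- B replaces A's copied mutable list and inner mutation loop with a closed-form string per formatted digit (objective: simpler).


-- shared helper: the characters of f"{n:04d}" (both Pythons format n the same way)
def pvFmt04 (n : Int) : List Char :=
  let s := PySem.Int.toChars n
  if n < 0 then '-' :: (List.replicate (4 - s.length) '0' ++ s.tail)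
  else List.replicate (4 - s.length) '0' ++ s

-- ===== PORT A =====
-- inner loop 'for j in range(0, d): lista[len(lista)-d-cont] = "O"; cont -= 1' (state = (lista, cont))
def pvInnerA (lista : List Char) (d : Int) : List Char :=
  ((PySem.List.pyRange 0 d 1).foldl
    (fun (st : List Char × Int) _j =>
      (PySem.List.pySetD st.1 (PySem.List.len st.1 - d - st.2) 'O', st.2 - 1))
    (lista, 0)).1

def devuelveCodigo (n : Int) : List String :=
  let lista : List Char := "XXXXXXXXXX".toList
  let lista_aux := lista
  let numero := pvFmt04 n
  ((PySem.List.pyRange 0 (PySem.List.len numero) 1).foldl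
    (fun (st : List Char × List String) i =>
      -- int(numero[i]): ValueError (non-digit char, i.e. n < 0) is excluded by Pre_
      let d := (PySem.Int.ofChars? [PySem.List.pyGetD numero i ' ']).getD 0
      (lista_aux, st.2 ++ [String.ofList (pvInnerA st.1 d)]))
    (lista, [])).2

-- ===== PORT B =====
def devuelveCodigo_alt (n : Int) : List String :=
  (pvFmt04 n).map (fun c =>
    let d := (PySem.Int.ofChars? [c]).getD 0
    String.ofList (List.replicate (10 - d).toNat 'X' ++ List.replicate d.toNat 'O'))

-- ===== PRECONDITION & SPEC =====
-- Pre_ excludes negative n, where int('-') raises ValueError in A (and in B as well).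
def Pre_devuelveCodigo (n : Int) : Prop := 0 ≤ n
instance (n : Int) : Decidable (Pre_devuelveCodigo n) := by unfold Pre_devuelveCodigo; infer_instance
def pvWitness_devuelveCodigo : Int := (1234)

def Spec_devuelveCodigo (n : Int) (out : List String) : Prop := out = devuelveCodigo_alt n
instance (n : Int) (out : List String) : Decidable (Spec_devuelveCodigo n out) := by unfold Spec_devuelveCodigo; infer_instance

-- ===== CLAIM (what is proved, stated in full; the proofs are below) =====
def Claim_equal_devuelveCodigo : Prop := ∀ (n : Int), Dom_devuelveCodigo n → Pre_devuelveCodigo n → Spec_devuelveCodigo n (devuelveCodigo n)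

-- ===== LEMMAS AND PROOFS =====

def pvDigits : List Char := ['0','1','2','3','4','5','6','7','8','9']

lemma toDigitsCore_digits (fuel : Nat) : ∀ (m : Nat) (ds : List Char),
    (∀ c ∈ ds, c ∈ pvDigits) → ∀ c ∈ Nat.toDigitsCore 10 fuel m ds, c ∈ pvDigits := by
  induction fuel with
  | zero => intro m ds h c hc; exact h c hc
  | succ fuel ih =>
    intro m ds h c hc
    have hdig : (m % 10).digitChar ∈ pvDigits := by
      have : m % 10 < 10 := Nat.mod_lt _ (by omega)
      interval_cases (m % 10) <;> decide
    rw [Nat.toDigitsCore] at hc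
    by_cases h0 : m / 10 = 0
    · rw [if_pos h0] at hc
      rcases List.mem_cons.mp hc with hc | hc
      · exact hc ▸ hdig
      · exact h c hc
    · rw [if_neg h0] at hc
      exact ih (m / 10) _ (by
        intro x hx
        rcases List.mem_cons.mp hx with hx | hx
        · exact hx ▸ hdig
        · exact h x hx) c hc

lemma fmt04_digits (n : Int) (hn : 0 ≤ n) : ∀ c ∈ pvFmt04 n, c ∈ pvDigits := by
  intro c hc
  unfold pvFmt04 at hc
  rw [if_neg (by omega)] at hc
  rcases List.mem_append.mp hc with hc | hc
  · have := List.eq_of_mem_replicate hc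
    subst this; decide
  · unfold PySem.Int.toChars at hc
    rw [if_neg (by omega)] at hc
    exact toDigitsCore_digits _ _ _ (by intro x hx; simp at hx) c hc

-- per-character agreement: A's inner mutation loop on "XXXXXXXXXX" equals B's closed-form string
lemma perChar (c : Char) (hc : c ∈ pvDigits) :
    String.ofList (pvInnerA "XXXXXXXXXX".toList ((PySem.Int.ofChars? [c]).getD 0)) =
    String.ofList (List.replicate (10 - (PySem.Int.ofChars? [c]).getD 0).toNat 'X' ++
               List.replicate ((PySem.Int.ofChars? [c]).getD 0).toNat 'O') := by
  fin_cases hc <;> decide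

-- the outer loop resets lista to lista_aux each iteration, so it is a map
lemma outerLoop (cs : List Char) (acc : List String) (st0 : List Char)
    (h : ∀ c ∈ cs, String.ofList (pvInnerA st0 ((PySem.Int.ofChars? [c]).getD 0)) =
          String.ofList (List.replicate (10 - (PySem.Int.ofChars? [c]).getD 0).toNat 'X' ++
                     List.replicate ((PySem.Int.ofChars? [c]).getD 0).toNat 'O')) :
    (cs.foldl
      (fun (st : List Char × List String) c =>
        let d := (PySem.Int.ofChars? [c]).getD 0
        (st0, st.2 ++ [String.ofList (pvInnerA st.1 d)]))
      (st0, acc)).2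
    = acc ++ cs.map (fun c =>
        let d := (PySem.Int.ofChars? [c]).getD 0
        String.ofList (List.replicate (10 - d).toNat 'X' ++ List.replicate d.toNat 'O')) := by
  induction cs generalizing acc with
  | nil => simp
  | cons c cs ih =>
    simp only [List.foldl_cons, List.map_cons]
    rw [h c List.mem_cons_self]
    rw [ih _ (fun x hx => h x (List.mem_cons_of_mem _ hx))]
    simp

-- ===== VERDICT (by name: the statement is the Claim_ definition above) =====
theorem devuelveCodigo_spec : Claim_equal_devuelveCodigo := by
  intro n _hdom hn
  unfold Spec_devuelveCodigo devuelveCodigo devuelveCodigo_alt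
  simp only []
  rw [PySem.List.foldl_pyRange_zero_pyGetD (pvFmt04 n) ' '
        (fun (st : List Char × List String) c =>
          (("XXXXXXXXXX".toList : List Char),
           st.2 ++ [String.ofList (pvInnerA st.1 ((PySem.Int.ofChars? [c]).getD 0))]))]
  rw [outerLoop (pvFmt04 n) [] "XXXXXXXXXX".toList
        (fun c hc => perChar c (fmt04_digits n hn c hc))]
  simp
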